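-- pv_equiv track=rewrite | github.com/axpokl/LightOut | ManimGL2/count_callsites_from_entry.py | accumulate_from_entry
-- ===== SOURCE A (Python) =====
-- def accumulate_from_entry(order, graph, entry):
--     total = {name: 0 for name in order}
--     visited = set()
--     def dfs(fn):
--         if fn in visited:
--             return
--         visited.add(fn)
--         for callee, cnt in graph.get(fn, {}).items():
--             total[callee] += cnt
--             dfs(callee)
--     if entry in graph:
--         dfs(entry)
--         total[entry] += 1
--     return total
-- ===== SOURCE B (Python) =====
-- def accumulate_from_entry(order, graph, entry):
--     if entry not in graph:
--         return {name: 0 for name in order}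
--     # phase 1: compute the set of nodes reachable from entry (explicit stack, no recursion)
--     reachable = set()
--     stack = [entry]
--     while stack:
--         fn = stack.pop()
--         if fn in reachable:
--             continue
--         reachable.add(fn)
--         # push in reverse so the next pop follows the first callee, as A's recursion does
--         stack.extend(reversed(list(graph.get(fn, {}))))
--     # phase 2: one pass over the graph, summing the edge counts out of reachable sources
--     total = {name: 0 for name in order}
--     for fn, row in graph.items():
--         if fn in reachable:
--             for callee, cnt in row.items():
--                 total[callee] += cnt
--     total[entry] += 1
--     return total
-- ===== Notes on version B (the rewrite author's own statement) =====
-- stated objective: alternative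
-- what changed: A's single recursive DFS closure that mutates the totals while traversing is replaced by two separate phases: an iterative worklist that only computes the reachable set, then one pass over the graph summing the rows of reachable sources into the totals (edge counts are order-independent, so the per-edge traversal order of the DFS can be replaced by graph order).
import Mathlib
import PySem

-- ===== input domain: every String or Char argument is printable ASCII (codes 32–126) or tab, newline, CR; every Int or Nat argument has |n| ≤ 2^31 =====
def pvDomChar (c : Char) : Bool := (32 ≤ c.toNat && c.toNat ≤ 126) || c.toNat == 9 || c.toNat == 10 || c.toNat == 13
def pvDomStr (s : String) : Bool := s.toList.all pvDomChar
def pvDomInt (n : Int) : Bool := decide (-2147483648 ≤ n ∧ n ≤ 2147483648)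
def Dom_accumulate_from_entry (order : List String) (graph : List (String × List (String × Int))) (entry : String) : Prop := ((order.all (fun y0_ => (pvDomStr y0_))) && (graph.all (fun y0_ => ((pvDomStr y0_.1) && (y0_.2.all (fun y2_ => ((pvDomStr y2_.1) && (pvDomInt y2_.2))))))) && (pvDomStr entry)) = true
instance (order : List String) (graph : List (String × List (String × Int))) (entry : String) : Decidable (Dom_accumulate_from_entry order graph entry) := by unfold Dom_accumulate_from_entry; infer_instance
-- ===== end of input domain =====

-- B replaces A's recursive DFS that updates the totals while traversing by two phases (an iterative reachable-set computation, then one pass over the graph summing rows of reachable sources); equivalence of the returned dict is proved on Pre_.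


-- ===== PORT A =====
-- graph.get(fn, {}) : first-match lookup in the association list (shared by both ports)
def pvRowA (graph : List (String × List (String × Int))) (fn : String) : List (String × Int) :=
  (PySem.Dict.get? ⟨graph⟩ fn).getD []

-- total number of edges in the graph (used only to size the fuel of the loops)
def pvE (graph : List (String × List (String × Int))) : Nat :=
  (graph.flatMap (fun p => p.2)).length

-- total[c] += n  (exact when c is a key of total, which Pre_ guarantees)
def pvAddA (t : PySem.Dict String Int) (c : String) (n : Int) : PySem.Dict String Int :=
  t.modify c 0 (· + n)

-- the recursive closure dfs, with fuel; pvFuelA is proved sufficient below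
-- (each non-short-circuiting nested call marks a fresh node)
def pvDfsA (graph : List (String × List (String × Int))) :
    Nat → String → PySem.Set String × PySem.Dict String Int →
    PySem.Set String × PySem.Dict String Int
  | 0, _, st => st
  | f + 1, fn, (v, t) =>
    if v.contains fn then (v, t)
    else
      (pvRowA graph fn).foldl
        (fun st q => pvDfsA graph f q.1 (st.1, pvAddA st.2 q.1 q.2))
        (PySem.Set.add v fn, t)

def pvFuelA (graph : List (String × List (String × Int))) : Nat := pvE graph + 2

def accumulate_from_entry (order : List String) (graph : List (String × List (String × Int))) (entry : String) : List (String × Int) :=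
  let total : PySem.Dict String Int := order.foldl (fun t name => t.insert name 0) ⟨[]⟩
  if (PySem.Dict.mk graph).contains entry then
    (pvAddA (pvDfsA graph (pvFuelA graph) entry (PySem.Set.empty, total)).2 entry 1).items
  else total.items

-- ===== PORT B =====
-- phase 1: the while-loop computing the reachable set, with fuel (pvFuelB bounds the
-- iteration count, proved sufficient below).  The stack is stored top-first: Python's
-- stack.pop() reads the head here, and stack.extend(reversed(list(graph.get(fn, {}))))
-- prepends the callee keys in dict order — exact.
def pvReachLoopB (graph : List (String × List (String × Int))) :
    Nat → List String → PySem.Set String → PySem.Set String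
  | 0, _, v => v
  | _ + 1, [], v => v
  | f + 1, fn :: stack, v =>
    if v.contains fn then pvReachLoopB graph f stack v
    else pvReachLoopB graph f ((pvRowA graph fn).map Prod.fst ++ stack) (PySem.Set.add v fn)

def pvFuelB (graph : List (String × List (String × Int))) : Nat :=
  (pvE graph + 2) * (pvE graph + 2)

-- phase 2 inner loop: for callee, cnt in row.items(): total[callee] += cnt
def pvAddRowB (t : PySem.Dict String Int) (row : List (String × Int)) : PySem.Dict String Int :=
  row.foldl (fun t q => t.modify q.1 0 (· + q.2)) t

def accumulate_from_entry_alt (order : List String) (graph : List (String × List (String × Int))) (entry : String) : List (String × Int) :=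
  if (PySem.Dict.mk graph).contains entry = false then
    (order.foldl (fun t name => t.insert name 0) (⟨[]⟩ : PySem.Dict String Int)).items
  else
    let reachable := pvReachLoopB graph (pvFuelB graph) [entry] PySem.Set.empty
    let total : PySem.Dict String Int := order.foldl (fun t name => t.insert name 0) ⟨[]⟩
    let total := graph.foldl
      (fun t p => if PySem.Set.contains reachable p.1 then pvAddRowB t p.2 else t) total
    (total.modify entry 0 (· + 1)).items

-- ===== PRECONDITION & SPEC =====
-- the nodes reachable from entry, as a saturation: one round adds every callee of every
-- already-reachable graph key; pvE+1 rounds reach the fixed point (proved below).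
-- (This is a property of the INPUT graph used to state Pre_, not a copy of either port.)
def pvStep (graph : List (String × List (String × Int))) (R : List String) : List String :=
  graph.foldl
    (fun R p =>
      if p.1 ∈ R then p.2.foldl (fun R q => if q.1 ∈ R then R else R ++ [q.1]) R else R) R

def pvReachSet (graph : List (String × List (String × Int))) (entry : String) : List String :=
  (pvStep graph)^[pvE graph + 1] [entry]

-- Pre_ excludes (i) association lists with duplicate graph or row keys, which represent no
-- Python dict (the dict convention), and (ii) exactly the inputs on which A raises KeyError:
-- entry is a graph key and either entry itself or the callee of some edge whose source is
-- reachable from entry is missing from order (total[...] += ... then hits a missing key).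
def Pre_accumulate_from_entry (order : List String) (graph : List (String × List (String × Int))) (entry : String) : Prop :=
  (graph.map Prod.fst).Nodup ∧ (∀ p ∈ graph, (p.2.map Prod.fst).Nodup) ∧
  ((PySem.Dict.mk graph).contains entry = true →
    entry ∈ order ∧ ∀ p ∈ graph, p.1 ∈ pvReachSet graph entry → ∀ q ∈ p.2, q.1 ∈ order)
instance (order : List String) (graph : List (String × List (String × Int))) (entry : String) : Decidable (Pre_accumulate_from_entry order graph entry) := by unfold Pre_accumulate_from_entry; infer_instance

def pvWitness_accumulate_from_entry : List String × (List (String × List (String × Int))) × String :=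
  (["a", "b"], [("a", [("b", 2)]), ("b", [])], "a")

def Spec_accumulate_from_entry (order : List String) (graph : List (String × List (String × Int))) (entry : String) (out : List (String × Int)) : Prop := out = accumulate_from_entry_alt order graph entry
instance (order : List String) (graph : List (String × List (String × Int))) (entry : String) (out : List (String × Int)) : Decidable (Spec_accumulate_from_entry order graph entry out) := by unfold Spec_accumulate_from_entry; infer_instance

-- ===== CLAIM (what is proved, stated in full; the proofs are below) =====
def Claim_equal_accumulate_from_entry : Prop := ∀ (order : List String) (graph : List (String × List (String × Int))) (entry : String), Dom_accumulate_from_entry order graph entry → Pre_accumulate_from_entry order graph entry → Spec_accumulate_from_entry order graph entry (accumulate_from_entry order graph entry)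

-- ===== LEMMAS AND PROOFS =====

theorem pvDictEq (a b : PySem.Dict String Int) (h : a.items = b.items) : a = b := by
  cases a; cases b; cases h; rfl

-- every node the traversal can ever mark: the entry plus every callee key
def pvU (graph : List (String × List (String × Int))) (entry : String) : List String :=
  entry :: graph.flatMap (fun p => p.2.map Prod.fst)

theorem pvU_length (graph : List (String × List (String × Int))) (entry : String) :
    (pvU graph entry).length = pvE graph + 1 := by
  have h : ∀ g : List (String × List (String × Int)),
      (g.flatMap (fun p => p.2.map Prod.fst)).length = (g.flatMap (fun p => p.2)).length := by
    intro g
    induction g with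
    | nil => rfl
    | cons p g ih => simp [ih]
  simp [pvU, pvE, h]

theorem pvRow_cases (graph : List (String × List (String × Int))) (fn : String) :
    pvRowA graph fn = [] ∨ (fn, pvRowA graph fn) ∈ graph := by
  unfold pvRowA
  cases h : PySem.Dict.get? (⟨graph⟩ : PySem.Dict String (List (String × Int))) fn with
  | none => exact Or.inl rfl
  | some row =>
    right
    have h2 := PySem.Dict.mem_items_of_get?_eq_some _ h
    simpa using h2

theorem pvRow_mem (graph : List (String × List (String × Int))) (fn : String)
    {q : String × Int} (hq : q ∈ pvRowA graph fn) : q ∈ graph.flatMap (fun p => p.2) := by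
  rcases pvRow_cases graph fn with h | h
  · rw [h] at hq; cases hq
  · exact List.mem_flatMap.2 ⟨(fn, pvRowA graph fn), h, hq⟩

theorem pvRow_len (graph : List (String × List (String × Int))) (fn : String) :
    (pvRowA graph fn).length ≤ pvE graph := by
  rcases pvRow_cases graph fn with h | h
  · simp [h]
  · unfold pvE
    have haux : ∀ (g : List (String × List (String × Int))) (p : String × List (String × Int)),
        p ∈ g → p.2.length ≤ (g.flatMap (fun x => x.2)).length := by
      intro g
      induction g with
      | nil => intro p hp; cases hp
      | cons a g ih =>
        intro p hp
        rcases List.mem_cons.1 hp with rfl | hp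
        · simp only [List.flatMap_cons, List.length_append]; omega
        · have := ih p hp
          simp only [List.flatMap_cons, List.length_append]
          omega
    exact haux graph (fn, pvRowA graph fn) h

theorem pvRow_keys_U (graph : List (String × List (String × Int))) (entry fn : String)
    {q : String × Int} (hq : q ∈ pvRowA graph fn) : q.1 ∈ pvU graph entry := by
  have h := pvRow_mem graph fn hq
  rcases List.mem_flatMap.1 h with ⟨p, hp, hqp⟩
  exact List.mem_cons_of_mem _ (List.mem_flatMap.2 ⟨p, hp, List.mem_map.2 ⟨q, hqp, rfl⟩⟩)

theorem pvFilterMono (U : List String) {v w : List String} (h : ∀ x ∈ v, x ∈ w) :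
    (U.filter (fun x => x ∉ w)).length ≤ (U.filter (fun x => x ∉ v)).length := by
  refine List.Sublist.length_le (List.monotone_filter_right U ?_)
  intro a ha
  simp only [decide_eq_true_eq] at *
  exact fun hv => ha (h a hv)

theorem pvFilterLt (U : List String) {v : List String} {c : String}
    (hcU : c ∈ U) (hcv : c ∉ v) :
    (U.filter (fun x => x ∉ v ++ [c])).length < (U.filter (fun x => x ∉ v)).length := by
  have hsub : (U.filter (fun x => x ∉ v ++ [c])).Sublist (U.filter (fun x => x ∉ v)) := by
    refine List.monotone_filter_right U ?_
    intro a ha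
    simp only [decide_eq_true_eq, List.mem_append, List.mem_singleton] at *
    exact fun hv => ha (Or.inl hv)
  refine Nat.lt_of_le_of_ne hsub.length_le (fun heq => ?_)
  have heqq := hsub.eq_of_length heq
  have hc1 : c ∈ U.filter (fun x => x ∉ v) := by
    simp [List.mem_filter, hcU, hcv]
  rw [← heqq] at hc1
  simp [List.mem_filter] at hc1

-- the common specification of the traversal: worklist DFS, no fuel, returning the visited
-- list and the concatenation of the rows of the newly visited nodes in visit order
def pvSpec (graph : List (String × List (String × Int))) (U : List String) :
    List String → List String → List String × List (String × Int)
  | [], v => (v, [])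
  | fn :: p, v =>
    if fn ∈ v ∨ fn ∉ U then pvSpec graph U p v
    else
      let r := pvSpec graph U ((pvRowA graph fn).map Prod.fst ++ p) (v ++ [fn])
      (r.1, pvRowA graph fn ++ r.2)
termination_by p v => ((U.filter (fun x => x ∉ v)).length, p.length)
decreasing_by
  · exact Prod.Lex.right _ (by simp)
  · exact Prod.Lex.left _ _ (pvFilterLt U (by tauto) (by tauto))

-- mirror of A's dfs: the same fuelled recursion, carrying only the visited list and
-- recording the individual '+= cnt' updates in the order A performs them
def pvFoldA (g : String → List String → List String × List (String × Int)) :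
    List (String × Int) → List String → List String × List (String × Int)
  | [], v => (v, [])
  | q :: rs, v =>
    let m := g q.1 v
    let r := pvFoldA g rs m.1
    (r.1, q :: (m.2 ++ r.2))

def pvMirA (graph : List (String × List (String × Int))) :
    Nat → String → List String → List String × List (String × Int)
  | 0, _, v => (v, [])
  | f + 1, fn, v =>
    if v.contains fn then (v, [])
    else pvFoldA (pvMirA graph f) (pvRowA graph fn) (v ++ [fn])

theorem pvFoldA_mono {g : String → List String → List String × List (String × Int)}
    (hg : ∀ c w, ∀ x ∈ w, x ∈ (g c w).1) :
    ∀ (rs : List (String × Int)) (v : List String), ∀ x ∈ v, x ∈ (pvFoldA g rs v).1 := by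
  intro rs
  induction rs with
  | nil => intro v x hx; simpa [pvFoldA] using hx
  | cons q rs ih =>
    intro v x hx
    simp only [pvFoldA]
    exact ih _ x (hg q.1 v x hx)

theorem pvMirA_mono (graph : List (String × List (String × Int))) :
    ∀ (f : Nat) (fn : String) (v : List String), ∀ x ∈ v, x ∈ (pvMirA graph f fn v).1 := by
  intro f
  induction f with
  | zero => intro fn v x hx; simpa [pvMirA] using hx
  | succ f ih =>
    intro fn v x hx
    by_cases h : v.contains fn
    · have hmem : fn ∈ v := by simpa using h
      simpa [pvMirA, hmem] using hx
    · simp only [pvMirA]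
      rw [if_neg h]
      exact pvFoldA_mono (fun c w y hy => ih c w y hy) _ _ x (List.mem_append_left _ hx)

-- A's port equals its mirror: the dict component is the initial dict with the recorded
-- updates applied in order
theorem pvDfsA_mir (graph : List (String × List (String × Int))) :
    ∀ (f : Nat) (fn : String) (v : List String) (t : PySem.Dict String Int),
      pvDfsA graph f fn (v, t) =
        ((pvMirA graph f fn v).1, pvAddRowB t (pvMirA graph f fn v).2) := by
  intro f
  induction f with
  | zero => intro fn v t; simp [pvDfsA, pvMirA, pvAddRowB]
  | succ f ih =>
    intro fn v t
    by_cases h : PySem.Set.contains v fn = true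
    · have hL : List.contains v fn = true := h
      simp only [pvDfsA, pvMirA]
      rw [if_pos h, if_pos hL]
      simp [pvAddRowB]
    · have hL : ¬ List.contains v fn = true := h
      have hadd : PySem.Set.add v fn = v ++ [fn] := by
        simp only [PySem.Set.add]
        rw [if_neg h]
      have aux : ∀ (rs : List (String × Int)) (w : List String) (t : PySem.Dict String Int),
          rs.foldl (fun st q => pvDfsA graph f q.1 (st.1, pvAddA st.2 q.1 q.2)) (w, t)
            = ((pvFoldA (pvMirA graph f) rs w).1,
               pvAddRowB t (pvFoldA (pvMirA graph f) rs w).2) := by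
        intro rs
        induction rs with
        | nil => intro w t; simp [pvFoldA, pvAddRowB]
        | cons q rs ihr =>
          intro w t
          simp only [List.foldl_cons, pvFoldA]
          rw [ih q.1 w (pvAddA t q.1 q.2), ihr]
          simp [pvAddRowB, pvAddA, List.foldl_append]
      simp only [pvDfsA, pvMirA]
      rw [if_neg h, if_neg hL, hadd]
      exact aux _ _ t

theorem pvPermSwap {α : Type} (a b X : List α) : (a ++ (b ++ X)).Perm (b ++ (a ++ X)) := by
  have h := (List.perm_append_comm (l₁ := a) (l₂ := b)).append_right X
  simpa [List.append_assoc] using h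

-- A's mirror defunctionalizes to the specification: same visited list, and the recorded
-- update sequence is a permutation of the specification's
theorem pvMirA_spec (graph : List (String × List (String × Int))) (entry : String) :
    ∀ (f : Nat) (fn : String) (p : List String) (v : List String),
      fn ∈ pvU graph entry →
      (((pvU graph entry).filter (fun x => x ∉ v)).length) + 1 ≤ f →
      (pvSpec graph (pvU graph entry) (fn :: p) v).1 =
        (pvSpec graph (pvU graph entry) p (pvMirA graph f fn v).1).1 ∧
      (pvSpec graph (pvU graph entry) (fn :: p) v).2.Perm
        ((pvMirA graph f fn v).2 ++ (pvSpec graph (pvU graph entry) p (pvMirA graph f fn v).1).2) := by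
  intro f
  induction f with
  | zero => intro fn p v hU hf; omega
  | succ f ih =>
    intro fn p v hU hf
    by_cases h : v.contains fn
    · have hmem : fn ∈ v := by simpa using h
      have hspec : pvSpec graph (pvU graph entry) (fn :: p) v
          = pvSpec graph (pvU graph entry) p v := by
        rw [pvSpec, if_pos (Or.inl hmem)]
      have hm : pvMirA graph (f + 1) fn v = (v, []) := by
        simp only [pvMirA]
        rw [if_pos h]
      rw [hspec, hm]
      exact ⟨rfl, by simp⟩
    · have hnm : fn ∉ v := by simpa using h
      have hm : pvMirA graph (f + 1) fn v
          = pvFoldA (pvMirA graph f) (pvRowA graph fn) (v ++ [fn]) := by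
        simp only [pvMirA]
        rw [if_neg h]
      have hspec : pvSpec graph (pvU graph entry) (fn :: p) v
          = ((pvSpec graph (pvU graph entry) ((pvRowA graph fn).map Prod.fst ++ p) (v ++ [fn])).1,
             pvRowA graph fn ++ (pvSpec graph (pvU graph entry) ((pvRowA graph fn).map Prod.fst ++ p) (v ++ [fn])).2) := by
        rw [pvSpec, if_neg (fun hor => hor.elim (fun hin => hnm hin) (fun hout => hout hU))]
      have hfuel1 : ((pvU graph entry).filter (fun x => x ∉ v ++ [fn])).length + 1 ≤ f := by
        have := pvFilterLt (pvU graph entry) hU hnm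
        omega
      have foldP : ∀ (rs : List (String × Int)) (p' : List String) (w : List String),
          (∀ q ∈ rs, q.1 ∈ pvU graph entry) →
          ((pvU graph entry).filter (fun x => x ∉ w)).length + 1 ≤ f →
          (pvSpec graph (pvU graph entry) (rs.map Prod.fst ++ p') w).1
            = (pvSpec graph (pvU graph entry) p' (pvFoldA (pvMirA graph f) rs w).1).1 ∧
          (rs ++ (pvSpec graph (pvU graph entry) (rs.map Prod.fst ++ p') w).2).Perm
            ((pvFoldA (pvMirA graph f) rs w).2
              ++ (pvSpec graph (pvU graph entry) p' (pvFoldA (pvMirA graph f) rs w).1).2) := by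
        intro rs
        induction rs with
        | nil =>
          intro p' w _ _
          constructor
          · simp [pvFoldA]
          · simp [pvFoldA]
        | cons q rs ihr =>
          intro p' w hks hfw
          have houter := ih q.1 (rs.map Prod.fst ++ p') w (hks q List.mem_cons_self) hfw
          have hm2 : ((pvU graph entry).filter (fun x => x ∉ (pvMirA graph f q.1 w).1)).length + 1 ≤ f := by
            have hmono := pvFilterMono (pvU graph entry)
              (fun x hx => pvMirA_mono graph f q.1 w x hx)
            omega
          have hinner := ihr p' (pvMirA graph f q.1 w).1
            (fun q' hq' => hks q' (List.mem_cons_of_mem _ hq')) hm2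
          have hFd : pvFoldA (pvMirA graph f) (q :: rs) w
              = ((pvFoldA (pvMirA graph f) rs (pvMirA graph f q.1 w).1).1,
                 q :: ((pvMirA graph f q.1 w).2
                   ++ (pvFoldA (pvMirA graph f) rs (pvMirA graph f q.1 w).1).2)) := by
            simp [pvFoldA]
          constructor
          · rw [hFd]
            simp only [List.map_cons, List.cons_append]
            rw [houter.1, hinner.1]
          · rw [hFd]
            simp only [List.map_cons, List.cons_append]
            refine List.Perm.trans (List.Perm.cons q (List.Perm.append_left rs houter.2)) ?_
            refine List.Perm.trans (List.Perm.cons q (pvPermSwap rs (pvMirA graph f q.1 w).2 _)) ?_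
            refine List.Perm.trans (List.Perm.cons q (List.Perm.append_left (pvMirA graph f q.1 w).2 hinner.2)) ?_
            simp [List.append_assoc]
      have hks : ∀ q ∈ pvRowA graph fn, q.1 ∈ pvU graph entry :=
        fun q hq => pvRow_keys_U graph entry fn hq
      have hFP := foldP (pvRowA graph fn) p (v ++ [fn]) hks hfuel1
      rw [hspec, hm]
      exact ⟨hFP.1, hFP.2⟩

-- ---- B's phase-1 loop computes the specification's visited list ----

theorem pvReachLoopB_spec (graph : List (String × List (String × Int))) (entry : String) :
    ∀ (f : Nat) (p : List String) (v : List String),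
      (∀ c ∈ p, c ∈ pvU graph entry) →
      p.length + (((pvU graph entry).filter (fun x => x ∉ v)).length) * (pvE graph + 1) ≤ f →
      pvReachLoopB graph f p v = (pvSpec graph (pvU graph entry) p v).1 := by
  intro f
  induction f with
  | zero =>
    intro p v hp hf
    cases p with
    | nil => simp [pvReachLoopB, pvSpec]
    | cons fn p => simp [List.length_cons] at hf
  | succ f ih =>
    intro p v hp hf
    cases p with
    | nil => simp [pvReachLoopB, pvSpec]
    | cons fn p =>
      by_cases h : PySem.Set.contains v fn = true
      · have hmem : fn ∈ v := by simpa using h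
        have hstep : pvSpec graph (pvU graph entry) (fn :: p) v
            = pvSpec graph (pvU graph entry) p v := by
          rw [pvSpec, if_pos (Or.inl hmem)]
        have hun : pvReachLoopB graph (f + 1) (fn :: p) v = pvReachLoopB graph f p v := by
          simp only [pvReachLoopB]
          rw [if_pos h]
        rw [hun, ih p v (fun c hc => hp c (List.mem_cons_of_mem _ hc))
          (by simp only [List.length_cons] at hf; omega), hstep]
      · have hnm : fn ∉ v := by simpa using h
        have hU : fn ∈ pvU graph entry := hp fn List.mem_cons_self
        have hadd : PySem.Set.add v fn = v ++ [fn] := by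
          simp only [PySem.Set.add]
          rw [if_neg h]
        have hstep : pvSpec graph (pvU graph entry) (fn :: p) v
            = ((pvSpec graph (pvU graph entry) ((pvRowA graph fn).map Prod.fst ++ p) (v ++ [fn])).1,
               pvRowA graph fn ++ (pvSpec graph (pvU graph entry) ((pvRowA graph fn).map Prod.fst ++ p) (v ++ [fn])).2) := by
          rw [pvSpec, if_neg (fun hor => hor.elim (fun hin => hnm hin) (fun hout => hout hU))]
        have hp' : ∀ c ∈ (pvRowA graph fn).map Prod.fst ++ p, c ∈ pvU graph entry := by
          intro c hc
          rcases List.mem_append.1 hc with hc | hc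
          · rcases List.mem_map.1 hc with ⟨q, hq, rfl⟩
            exact pvRow_keys_U graph entry fn hq
          · exact hp c (List.mem_cons_of_mem _ hc)
        have hf' : ((pvRowA graph fn).map Prod.fst ++ p).length
            + (((pvU graph entry).filter (fun x => x ∉ v ++ [fn])).length) * (pvE graph + 1) ≤ f := by
          have hrow : (pvRowA graph fn).length ≤ pvE graph := pvRow_len graph fn
          have hdec := pvFilterLt (pvU graph entry) hU hnm
          set a := ((pvU graph entry).filter (fun x => x ∉ v)).length with ha
          set b := ((pvU graph entry).filter (fun x => x ∉ v ++ [fn])).length with hb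
          have hmul : (b + 1) * (pvE graph + 1) ≤ a * (pvE graph + 1) :=
            Nat.mul_le_mul_right _ (by omega)
          have hexp : (b + 1) * (pvE graph + 1) = b * (pvE graph + 1) + (pvE graph + 1) := by ring
          simp only [List.length_cons, List.length_append, List.length_map] at hf ⊢
          omega
        have hun : pvReachLoopB graph (f + 1) (fn :: p) v
            = pvReachLoopB graph f ((pvRowA graph fn).map Prod.fst ++ p) (v ++ [fn]) := by
          simp only [pvReachLoopB]
          rw [if_neg h, hadd]
        rw [hun, ih _ _ hp' hf', hstep]

-- ---- the saturation pvReachSet: basic facts, fixed point, closedness ----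

theorem pvFoldlPrefix {α β : Type} (f : List α → β → List α)
    (h : ∀ R a, R <+: f R a) : ∀ (l : List β) (R : List α), R <+: l.foldl f R := by
  intro l
  induction l with
  | nil => intro R; exact List.prefix_rfl
  | cons a l ih => intro R; exact (h R a).trans (ih (f R a))

theorem pvInnerPrefix (row : List (String × Int)) (R : List String) :
    R <+: row.foldl (fun R q => if q.1 ∈ R then R else R ++ [q.1]) R := by
  refine pvFoldlPrefix _ ?_ row R
  intro R q
  by_cases h : q.1 ∈ R
  · rw [if_pos h]
  · rw [if_neg h]; exact List.prefix_append _ _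

theorem pvStep_prefix (graph : List (String × List (String × Int))) (R : List String) :
    R <+: pvStep graph R := by
  unfold pvStep
  refine pvFoldlPrefix _ ?_ graph R
  intro R p
  by_cases h : p.1 ∈ R
  · rw [if_pos h]; exact pvInnerPrefix p.2 R
  · rw [if_neg h]

theorem pvInnerMem (row : List (String × Int)) :
    ∀ (R : List String), ∀ q ∈ row, q.1 ∈ row.foldl (fun R q => if q.1 ∈ R then R else R ++ [q.1]) R := by
  induction row with
  | nil => intro R q hq; cases hq
  | cons a row ih =>
    intro R q hq
    simp only [List.foldl_cons]
    rcases List.mem_cons.1 hq with rfl | hq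
    · apply (pvInnerPrefix row _).subset
      by_cases h : q.1 ∈ R
      · simp [h]
      · simp [h]
    · exact ih _ q hq

theorem pvInnerSub (row : List (String × Int)) :
    ∀ (R : List String) (x : String),
      x ∈ row.foldl (fun R q => if q.1 ∈ R then R else R ++ [q.1]) R →
      x ∈ R ∨ x ∈ row.map Prod.fst := by
  induction row with
  | nil => intro R x hx; exact Or.inl hx
  | cons a row ih =>
    intro R x hx
    simp only [List.foldl_cons] at hx
    rcases ih _ x hx with h | h
    · by_cases ha : a.1 ∈ R
      · rw [if_pos ha] at h; exact Or.inl h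
      · rw [if_neg ha] at h
        rcases List.mem_append.1 h with h | h
        · exact Or.inl h
        · right; simp only [List.mem_singleton] at h; simp [h]
    · right; exact List.mem_cons_of_mem _ h

theorem pvInnerNodup (row : List (String × Int)) :
    ∀ (R : List String), R.Nodup →
      (row.foldl (fun R q => if q.1 ∈ R then R else R ++ [q.1]) R).Nodup := by
  induction row with
  | nil => intro R h; exact h
  | cons a row ih =>
    intro R h
    simp only [List.foldl_cons]
    apply ih
    by_cases ha : a.1 ∈ R
    · rw [if_pos ha]; exact h
    · rw [if_neg ha]
      simp [List.nodup_append, h]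
      exact fun x hx hxe => ha (hxe ▸ hx)

theorem pvStep_sub (graph : List (String × List (String × Int))) :
    ∀ (R : List String) (x : String), x ∈ pvStep graph R →
      x ∈ R ∨ x ∈ graph.flatMap (fun p => p.2.map Prod.fst) := by
  induction graph with
  | nil => intro R x hx; exact Or.inl hx
  | cons p graph ih =>
    intro R x hx
    unfold pvStep at hx
    simp only [List.foldl_cons] at hx
    rcases ih _ x hx with h | h
    · by_cases hp : p.1 ∈ R
      · rw [if_pos hp] at h
        rcases pvInnerSub p.2 R x h with h | h
        · exact Or.inl h
        · right; simp only [List.flatMap_cons, List.mem_append]; exact Or.inl h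
      · rw [if_neg hp] at h; exact Or.inl h
    · right; simp only [List.flatMap_cons, List.mem_append]; exact Or.inr h

theorem pvStep_nodup (graph : List (String × List (String × Int))) :
    ∀ (R : List String), R.Nodup → (pvStep graph R).Nodup := by
  induction graph with
  | nil => intro R h; exact h
  | cons p graph ih =>
    intro R h
    unfold pvStep
    simp only [List.foldl_cons]
    apply ih
    by_cases hp : p.1 ∈ R
    · rw [if_pos hp]; exact pvInnerNodup p.2 R h
    · rw [if_neg hp]; exact h

theorem pvStep_closed (graph : List (String × List (String × Int))) :
    ∀ (R : List String) (p : String × List (String × Int)), p ∈ graph → p.1 ∈ R →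
      ∀ q ∈ p.2, q.1 ∈ pvStep graph R := by
  induction graph with
  | nil => intro R p hp; cases hp
  | cons a graph ih =>
    intro R p hp h1 q hq
    unfold pvStep
    simp only [List.foldl_cons]
    rcases List.mem_cons.1 hp with rfl | hp
    · rw [if_pos h1]
      exact (pvStep_prefix graph _).subset (pvInnerMem p.2 R q hq)
    · have hsub : R <+: (if a.1 ∈ R then a.2.foldl (fun R q => if q.1 ∈ R then R else R ++ [q.1]) R else R) := by
        by_cases ha : a.1 ∈ R
        · rw [if_pos ha]; exact pvInnerPrefix a.2 R
        · rw [if_neg ha]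
      exact ih _ p hp (hsub.subset h1) q hq

theorem pvIter_prefix (graph : List (String × List (String × Int))) :
    ∀ (n : Nat) (R : List String), R <+: (pvStep graph)^[n] R := by
  intro n
  induction n with
  | zero => intro R; exact List.prefix_rfl
  | succ n ih =>
    intro R
    rw [Function.iterate_succ_apply]
    exact (pvStep_prefix graph R).trans (ih (pvStep graph R))

theorem pvIter_grow (graph : List (String × List (String × Int))) :
    ∀ (n : Nat) (R : List String),
      pvStep graph ((pvStep graph)^[n] R) = (pvStep graph)^[n] R ∨
      R.length + n ≤ ((pvStep graph)^[n] R).length := by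
  intro n
  induction n with
  | zero => intro R; right; simp
  | succ n ih =>
    intro R
    obtain ⟨s, hs⟩ := pvStep_prefix graph R
    rw [Function.iterate_succ_apply]
    cases s with
    | nil =>
      left
      have hfix : pvStep graph R = R := by simpa using hs.symm
      rw [hfix, Function.iterate_fixed hfix, hfix]
    | cons b s =>
      have hlen : R.length + 1 ≤ (pvStep graph R).length := by
        rw [← hs]; simp
      rcases ih (pvStep graph R) with h | h
      · left; exact h
      · right; omega

theorem pvIter_sub_U (graph : List (String × List (String × Int))) (entry : String) :
    ∀ (n : Nat) (R : List String), (∀ x ∈ R, x ∈ pvU graph entry) →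
      ∀ x ∈ (pvStep graph)^[n] R, x ∈ pvU graph entry := by
  intro n
  induction n with
  | zero => intro R h; exact h
  | succ n ih =>
    intro R h
    rw [Function.iterate_succ_apply]
    apply ih
    intro x hx
    rcases pvStep_sub graph R x hx with h1 | h1
    · exact h x h1
    · exact List.mem_cons_of_mem _ h1

theorem pvIter_nodup (graph : List (String × List (String × Int))) :
    ∀ (n : Nat) (R : List String), R.Nodup → ((pvStep graph)^[n] R).Nodup := by
  intro n
  induction n with
  | zero => intro R h; exact h
  | succ n ih =>
    intro R h
    rw [Function.iterate_succ_apply]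
    exact ih _ (pvStep_nodup graph R h)

theorem pvReachSet_fix (graph : List (String × List (String × Int))) (entry : String) :
    pvStep graph (pvReachSet graph entry) = pvReachSet graph entry := by
  rcases pvIter_grow graph (pvE graph + 1) [entry] with h | h
  · exact h
  · exfalso
    have hnd : ((pvStep graph)^[pvE graph + 1] [entry]).Nodup :=
      pvIter_nodup graph _ [entry] (by simp)
    have hsub : (pvStep graph)^[pvE graph + 1] [entry] ⊆ pvU graph entry := by
      intro x hx
      refine pvIter_sub_U graph entry _ [entry] ?_ x hx
      intro y hy
      simp only [List.mem_singleton] at hy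
      rw [hy]; exact List.mem_cons_self
    have hle : ((pvStep graph)^[pvE graph + 1] [entry]).length ≤ (pvU graph entry).length :=
      (List.subperm_of_subset hnd hsub).length_le
    rw [pvU_length] at hle
    simp only [List.length_singleton] at h
    omega

theorem pvReachSet_entry (graph : List (String × List (String × Int))) (entry : String) :
    entry ∈ pvReachSet graph entry :=
  (pvIter_prefix graph _ [entry]).subset List.mem_cons_self

theorem pvReachSet_closed (graph : List (String × List (String × Int))) (entry : String)
    (p : String × List (String × Int)) (hp : p ∈ graph) (h1 : p.1 ∈ pvReachSet graph entry) :
    ∀ q ∈ p.2, q.1 ∈ pvReachSet graph entry := by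
  rw [← pvReachSet_fix graph entry]
  exact pvStep_closed graph _ p hp h1

-- ---- the visited list of the specification: decomposition, nodup, soundness ----

theorem pvSpec_visited (graph : List (String × List (String × Int))) (U : List String) :
    ∀ (p v : List String), ∃ w,
      (pvSpec graph U p v).1 = v ++ w ∧
      (pvSpec graph U p v).2 = (w.map (fun x => pvRowA graph x)).flatten := by
  intro p v
  induction p, v using pvSpec.induct graph U with
  | case1 v => exact ⟨[], by rw [pvSpec]; simp⟩
  | case2 fn p v h ih =>
    obtain ⟨w, h1, h2⟩ := ih
    exact ⟨w, by rw [pvSpec, if_pos h]; exact h1, by rw [pvSpec, if_pos h]; exact h2⟩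
  | case3 fn p v h ih =>
    obtain ⟨w, h1, h2⟩ := ih
    refine ⟨fn :: w, ?_, ?_⟩
    · rw [pvSpec, if_neg h]
      simp only [h1, List.append_assoc, List.singleton_append]
    · rw [pvSpec, if_neg h]
      simp [h2]

theorem pvSpec_nodup (graph : List (String × List (String × Int))) (U : List String) :
    ∀ (p v : List String), v.Nodup → (pvSpec graph U p v).1.Nodup := by
  intro p v
  induction p, v using pvSpec.induct graph U with
  | case1 v => intro h; rw [pvSpec]; exact h
  | case2 fn p v h ih => intro hv; rw [pvSpec, if_pos h]; exact ih hv
  | case3 fn p v h ih =>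
    intro hv
    rw [pvSpec, if_neg h]
    have hfn : fn ∉ v := fun hin => h (Or.inl hin)
    refine ih ?_
    simp [List.nodup_append, hv]
    exact fun a hav hafn => hfn (hafn ▸ hav)

theorem pvSpec_sound (graph : List (String × List (String × Int))) (entry : String) :
    ∀ (p v : List String),
      (∀ x ∈ p, x ∈ pvReachSet graph entry) →
      (∀ x ∈ v, x ∈ pvReachSet graph entry) →
      ∀ x ∈ (pvSpec graph (pvU graph entry) p v).1, x ∈ pvReachSet graph entry := by
  intro p v
  induction p, v using pvSpec.induct graph (pvU graph entry) with
  | case1 v => intro _ hv x hx; rw [pvSpec] at hx; exact hv x hx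
  | case2 fn p v h ih =>
    intro hp hv x hx
    rw [pvSpec, if_pos h] at hx
    exact ih (fun c hc => hp c (List.mem_cons_of_mem _ hc)) hv x hx
  | case3 fn p v h ih =>
    intro hp hv x hx
    rw [pvSpec, if_neg h] at hx
    have hfn : fn ∈ pvReachSet graph entry := hp fn List.mem_cons_self
    refine ih ?_ ?_ x hx
    · intro c hc
      rcases List.mem_append.1 hc with hc | hc
      · rcases List.mem_map.1 hc with ⟨q, hq, rfl⟩
        rcases pvRow_cases graph fn with hro | hro
        · rw [hro] at hq; cases hq
        · exact pvReachSet_closed graph entry _ hro hfn q hq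
      · exact hp c (List.mem_cons_of_mem _ hc)
    · intro c hc
      rcases List.mem_append.1 hc with hc | hc
      · exact hv c hc
      · simp only [List.mem_singleton] at hc; rw [hc]; exact hfn

-- ---- applying a permuted update sequence to a dict that contains all touched keys ----

def pvSumAt (k : String) (δ : List (String × Int)) : Int :=
  (δ.map (fun q => if q.1 = k then q.2 else 0)).sum

theorem pvSumAt_perm (k : String) {δ₁ δ₂ : List (String × Int)} (h : δ₁.Perm δ₂) :
    pvSumAt k δ₁ = pvSumAt k δ₂ := by
  unfold pvSumAt
  exact List.Perm.sum_eq (h.map _)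

theorem pvAddRowB_items (δ : List (String × Int)) :
    ∀ (d : PySem.Dict String Int), d.keys.Nodup → (∀ q ∈ δ, d.contains q.1 = true) →
      (pvAddRowB d δ).items = d.items.map (fun p => (p.1, p.2 + pvSumAt p.1 δ)) := by
  induction δ with
  | nil =>
    intro d _ _
    simp [pvAddRowB, pvSumAt]
  | cons q δ ih =>
    intro d hn hc
    have hcont : d.contains q.1 = true := hc q List.mem_cons_self
    have hitems : (d.modify q.1 0 (· + q.2)).items
        = d.items.map (fun p => if p.1 = q.1 then (p.1, p.2 + q.2) else p) := by
      show (d.insert q.1 (d.getD q.1 0 + q.2)).items = _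
      rw [PySem.Dict.items_insert_of_contains _ _ hcont]
      refine List.map_congr_left ?_
      intro p hp
      by_cases hpq : p.1 = q.1
      · have hmem' : (q.1, p.2) ∈ d.items := by
          rw [← hpq]
          simpa using hp
        have hval : d.getD q.1 0 = p.2 :=
          PySem.Dict.getD_of_mem_items _ hmem' hn 0
        simp [hpq, hval]
      · simp [hpq]
    have hkeys : (d.modify q.1 0 (· + q.2)).keys = d.keys := by
      rw [PySem.Dict.keys_modify]
      exact PySem.Dict.keys_insert_of_contains _ _ hcont
    have hn' : (d.modify q.1 0 (· + q.2)).keys.Nodup := by rw [hkeys]; exact hn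
    have hc' : ∀ q' ∈ δ, (d.modify q.1 0 (· + q.2)).contains q'.1 = true := by
      intro q' hq'
      rw [PySem.Dict.contains_modify]
      simp [hc q' (List.mem_cons_of_mem _ hq')]
    have : pvAddRowB d (q :: δ) = pvAddRowB (d.modify q.1 0 (· + q.2)) δ := rfl
    rw [this, ih _ hn' hc', hitems, List.map_map]
    refine List.map_congr_left ?_
    intro p _
    by_cases hpq : p.1 = q.1
    · simp [Function.comp, hpq, pvSumAt, add_assoc]
    · have hpq' : ¬ q.1 = p.1 := fun hh => hpq hh.symm
      simp [Function.comp, hpq, hpq', pvSumAt]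

theorem pvAddRowB_perm {δ₁ δ₂ : List (String × Int)} (h : δ₁.Perm δ₂)
    (d : PySem.Dict String Int) (hn : d.keys.Nodup) (hc : ∀ q ∈ δ₁, d.contains q.1 = true) :
    pvAddRowB d δ₁ = pvAddRowB d δ₂ := by
  have hc₂ : ∀ q ∈ δ₂, d.contains q.1 = true := fun q hq => hc q (h.mem_iff.2 hq)
  refine pvDictEq _ _ ?_
  rw [pvAddRowB_items δ₁ d hn hc, pvAddRowB_items δ₂ d hn hc₂]
  refine List.map_congr_left ?_
  intro p _
  rw [pvSumAt_perm p.1 h]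

-- ---- B's phase-2 pass as one pvAddRowB over the filtered, flattened rows ----

theorem pvAddRowB_append (t : PySem.Dict String Int) (a b : List (String × Int)) :
    pvAddRowB t (a ++ b) = pvAddRowB (pvAddRowB t a) b := by
  simp [pvAddRowB, List.foldl_append]

theorem pvFoldGraph (C : (String × List (String × Int)) → Bool) :
    ∀ (g : List (String × List (String × Int))) (t : PySem.Dict String Int),
      g.foldl (fun t p => if C p = true then pvAddRowB t p.2 else t) t
        = pvAddRowB t (((g.filter C).map (fun p => p.2)).flatten) := by
  intro g
  induction g with
  | nil => intro t; simp [pvAddRowB]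
  | cons a g ih =>
    intro t
    simp only [List.foldl_cons, List.filter_cons]
    cases h : C a with
    | true => simp [ih, pvAddRowB_append]
    | false => simp [ih]

-- ---- relating the two row collections by a permutation ----

theorem pvRowA_of_mem (graph : List (String × List (String × Int)))
    (hnd : (graph.map Prod.fst).Nodup) {p : String × List (String × Int)} (hp : p ∈ graph) :
    pvRowA graph p.1 = p.2 := by
  unfold pvRowA
  have h : (PySem.Dict.mk graph).get? p.1 = some p.2 := by
    refine PySem.Dict.get?_of_mem_items _ ?_ ?_
    · simpa using hp
    · simpa [PySem.Dict.keys] using hnd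
  rw [h]
  rfl

theorem pvRowA_nil (graph : List (String × List (String × Int))) (fn : String)
    (h : (PySem.Dict.mk graph).contains fn = false) : pvRowA graph fn = [] := by
  unfold pvRowA
  cases hg : PySem.Dict.get? (⟨graph⟩ : PySem.Dict String (List (String × Int))) fn with
  | none => rfl
  | some row =>
    exfalso
    have : (PySem.Dict.mk graph).contains fn = true := by
      rw [PySem.Dict.contains_eq_isSome_get?, hg]
      rfl
    rw [this] at h
    cases h

theorem pvFlatten_filter (graph : List (String × List (String × Int))) :
    ∀ (V : List String),
      (((V.filter (fun x => (PySem.Dict.mk graph).contains x)).map (fun x => pvRowA graph x)).flatten)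
        = ((V.map (fun x => pvRowA graph x)).flatten) := by
  intro V
  induction V with
  | nil => rfl
  | cons a V ih =>
    rw [List.filter_cons]
    by_cases h : (PySem.Dict.mk graph).contains a = true
    · rw [if_pos h]
      simp only [List.map_cons, List.flatten_cons, ih]
    · rw [if_neg h]
      have hb : (PySem.Dict.mk graph).contains a = false := by
        cases hc : (PySem.Dict.mk graph).contains a
        · rfl
        · exact absurd hc h
      rw [ih]
      simp [pvRowA_nil graph a hb]

theorem pvFilter_map_fst (g : List (String × List (String × Int))) (Q : String → Bool) :
    (g.map Prod.fst).filter Q = (g.filter (fun p => Q p.1)).map Prod.fst := by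
  induction g with
  | nil => rfl
  | cons a g ih =>
    simp only [List.map_cons, List.filter_cons]
    cases h : Q a.1 with
    | true => simp [ih]
    | false => simp [ih]

-- ---- the initial dict {name: 0 for name in order} ----

theorem pvTotal_nodup (order : List String) :
    ∀ (d : PySem.Dict String Int), d.keys.Nodup →
      (order.foldl (fun t name => t.insert name 0) d).keys.Nodup := by
  induction order with
  | nil => intro d hd; simpa using hd
  | cons a order ih =>
    intro d hd
    simp only [List.foldl_cons]
    exact ih _ (PySem.Dict.nodup_keys_insert _ _ _ hd)

theorem pvTotal_contains (order : List String) (c : String) :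
    ∀ (d : PySem.Dict String Int), (c ∈ order ∨ d.contains c = true) →
      (order.foldl (fun t name => t.insert name 0) d).contains c = true := by
  induction order with
  | nil =>
    intro d h
    rcases h with h | h
    · cases h
    · simpa using h
  | cons a order ih =>
    intro d h
    simp only [List.foldl_cons]
    apply ih
    rcases h with h | h
    · rcases List.mem_cons.1 h with rfl | h
      · right
        rw [PySem.Dict.contains_insert]
        simp
      · left; exact h
    · right
      rw [PySem.Dict.contains_insert]
      simp [h]

-- ===== VERDICT (by name: the statement is the Claim_ definition above) =====
theorem accumulate_from_entry_spec : Claim_equal_accumulate_from_entry := by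
  intro order graph entry _ hpre
  unfold Spec_accumulate_from_entry
  obtain ⟨hknd, _, himpl⟩ := hpre
  by_cases hent : (PySem.Dict.mk graph).contains entry = true
  · obtain ⟨hentord, hcall⟩ := himpl hent
    unfold accumulate_from_entry accumulate_from_entry_alt
    simp only [hent, if_true, Bool.true_eq_false, if_false]
    set T : PySem.Dict String Int := order.foldl (fun t name => t.insert name 0) ⟨[]⟩ with hT
    have hempty : (PySem.Set.empty : PySem.Set String) = ([] : List String) := rfl
    rw [hempty, pvDfsA_mir graph (pvFuelA graph) entry [] T]
    have hUent : entry ∈ pvU graph entry := List.mem_cons_self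
    have hfilter : ((pvU graph entry).filter (fun x => x ∉ ([] : List String))).length
        = pvE graph + 1 := by
      simp [pvU_length]
    have hfA : ((pvU graph entry).filter (fun x => x ∉ ([] : List String))).length + 1
        ≤ pvFuelA graph := by
      rw [hfilter]
      unfold pvFuelA
      omega
    have hfB : ([entry] : List String).length
        + ((pvU graph entry).filter (fun x => x ∉ ([] : List String))).length * (pvE graph + 1)
        ≤ pvFuelB graph := by
      rw [hfilter]
      show 1 + (pvE graph + 1) * (pvE graph + 1) ≤ (pvE graph + 2) * (pvE graph + 2)
      nlinarith [pvE graph]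
    -- the common visited list
    set V : List String := (pvSpec graph (pvU graph entry) [entry] []).1 with hV
    have hloop : pvReachLoopB graph (pvFuelB graph) [entry] [] = V := by
      refine pvReachLoopB_spec graph entry (pvFuelB graph) [entry] [] ?_ hfB
      intro c hc
      rcases List.mem_cons.1 hc with rfl | hc
      · exact hUent
      · cases hc
    rw [hloop]
    -- B's phase 2 is one pvAddRowB over the filtered flattened rows
    rw [pvFoldGraph (fun p => PySem.Set.contains V p.1) graph T]
    -- the specification's update sequence
    obtain ⟨w, hw1, hw2⟩ := pvSpec_visited graph (pvU graph entry) [entry] []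
    have hwV : V = w := by rw [hV, hw1]; rfl
    have hVnd : V.Nodup := pvSpec_nodup graph (pvU graph entry) [entry] [] (by simp)
    have hVsound : ∀ x ∈ V, x ∈ pvReachSet graph entry := by
      refine pvSpec_sound graph entry [entry] [] ?_ ?_
      · intro x hx
        have hxe : x = entry := by simpa using hx
        rw [hxe]
        exact pvReachSet_entry graph entry
      · intro x hx; cases hx
    -- containment of the touched keys among the keys of T
    have hnodupT : T.keys.Nodup := by
      rw [hT]
      exact pvTotal_nodup order ⟨[]⟩ (by simp [PySem.Dict.keys])
    have hcontS : ∀ q ∈ (pvSpec graph (pvU graph entry) [entry] []).2, T.contains q.1 = true := by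
      intro q hq
      rw [hw2] at hq
      rcases List.mem_flatten.1 hq with ⟨l, hl, hql⟩
      rcases List.mem_map.1 hl with ⟨fn, hfn, rfl⟩
      have hfnV : fn ∈ V := by rw [hwV]; exact hfn
      have hreach := hVsound fn hfnV
      rcases pvRow_cases graph fn with hro | hro
      · rw [hro] at hql; cases hql
      · have hqo : q.1 ∈ order := hcall _ hro hreach q hql
        exact pvTotal_contains order q.1 ⟨[]⟩ (Or.inl hqo)
    -- A's update sequence is a permutation of the specification's
    have hMS := pvMirA_spec graph entry (pvFuelA graph) entry [] [] hUent hfA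
    have hnil : ∀ w', pvSpec graph (pvU graph entry) [] w' = (w', []) := fun w' => by rw [pvSpec]
    rw [hnil] at hMS
    have hpermA : (pvSpec graph (pvU graph entry) [entry] []).2.Perm
        (pvMirA graph (pvFuelA graph) entry []).2 := by
      have := hMS.2
      simpa using this
    -- B's update sequence is a permutation of the specification's
    have hdc : (V.filter (fun x => (PySem.Dict.mk graph).contains x)).Perm
        ((graph.map Prod.fst).filter (fun x => PySem.Set.contains V x)) := by
      refine (List.perm_ext_iff_of_nodup (hVnd.filter _) ((hknd).filter _)).2 ?_
      intro a
      simp only [List.mem_filter]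
      constructor
      · rintro ⟨haV, hak⟩
        refine ⟨?_, ?_⟩
        · have := (PySem.Dict.contains_iff_mem_keys _ _).1 hak
          simpa [PySem.Dict.keys] using this
        · simpa [PySem.Set.contains] using haV
      · rintro ⟨hak, haV⟩
        refine ⟨?_, ?_⟩
        · simpa [PySem.Set.contains] using haV
        · exact (PySem.Dict.contains_iff_mem_keys _ _).2 (by simpa [PySem.Dict.keys] using hak)
    have hEq2 : ((graph.map Prod.fst).filter (fun x => PySem.Set.contains V x)).map (fun x => pvRowA graph x)
        = ((graph.filter (fun p => PySem.Set.contains V p.1)).map (fun p => p.2)) := by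
      rw [pvFilter_map_fst graph (fun x => PySem.Set.contains V x), List.map_map]
      refine List.map_congr_left ?_
      intro p hp
      exact pvRowA_of_mem graph hknd (List.mem_of_mem_filter hp)
    have hpermB : (pvSpec graph (pvU graph entry) [entry] []).2.Perm
        (((graph.filter (fun p => PySem.Set.contains V p.1)).map (fun p => p.2)).flatten) := by
      rw [hw2, ← hwV]
      rw [← pvFlatten_filter graph V, ← hEq2]
      exact (hdc.map _).flatten
    -- assemble
    have hA : pvAddRowB T (pvMirA graph (pvFuelA graph) entry []).2
        = pvAddRowB T (pvSpec graph (pvU graph entry) [entry] []).2 :=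
      pvAddRowB_perm hpermA.symm T hnodupT
        (fun q hq => hcontS q (hpermA.mem_iff.2 hq))
    have hB : pvAddRowB T (pvSpec graph (pvU graph entry) [entry] []).2
        = pvAddRowB T (((graph.filter (fun p => PySem.Set.contains V p.1)).map (fun p => p.2)).flatten) :=
      pvAddRowB_perm hpermB T hnodupT hcontS
    rw [hA, hB]
    rfl
  · have hent' : (PySem.Dict.mk graph).contains entry = false := by
      cases hb : (PySem.Dict.mk graph).contains entry
      · rfl
      · exact absurd hb hent
    unfold accumulate_from_entry accumulate_from_entry_alt
    simp [hent']
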